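-- pv_equiv track=rewrite | github.com/jsrdhara/Datastructures | Sequential Search.py | OrderedSequrntialSearch
-- ===== SOURCE A (Python) =====
-- def OrderedSequrntialSearch(mylist,item):
--     mylist=sorted(mylist)
--     found = False
--     stop = False
--     index=0
--     while index <len(mylist) and not found and not stop:
--         if mylist[index]==item:
--             found =True
--         else:
--             if mylist[index]>item:
--                 stop = True
--             else:
--                 index = index+1
--     return found
-- ===== SOURCE B (Python) =====
-- import bisect
--
-- def OrderedSequrntialSearch(mylist, item):
--     s = sorted(mylist)
--     i = bisect.bisect_left(s, item)
--     return i < len(s) and s[i] == item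
-- ===== Notes on version B (the rewrite author's own statement) =====
-- stated objective: alternative
-- what changed: Replaces the linear early-stopping scan over the sorted copy with a bisect_left binary-search probe on the same sorted copy.
import Mathlib
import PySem

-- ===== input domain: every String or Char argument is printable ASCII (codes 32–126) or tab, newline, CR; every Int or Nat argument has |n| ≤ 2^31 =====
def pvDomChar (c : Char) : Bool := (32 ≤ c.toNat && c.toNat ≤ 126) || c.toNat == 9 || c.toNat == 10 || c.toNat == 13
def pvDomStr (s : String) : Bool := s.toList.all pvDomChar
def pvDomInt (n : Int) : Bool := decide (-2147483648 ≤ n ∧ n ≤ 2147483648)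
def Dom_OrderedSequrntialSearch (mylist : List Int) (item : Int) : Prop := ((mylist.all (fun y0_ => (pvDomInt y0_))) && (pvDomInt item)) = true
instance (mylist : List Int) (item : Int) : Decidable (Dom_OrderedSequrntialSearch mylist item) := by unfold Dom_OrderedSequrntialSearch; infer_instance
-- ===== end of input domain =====

-- B replaces A's linear early-stopping scan of the sorted copy by a bisect_left
-- binary-search probe on the same sorted copy (alternative algorithm, same result).

-- ===== PORT A =====
-- the while loop of A: walks the sorted list from the front, stops early on a larger element
def osLoopA (item : Int) : List Int → Bool
  | [] => false
  | x :: xs =>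
      if x == item then true
      else if x > item then false
      else osLoopA item xs

def OrderedSequrntialSearch (mylist : List Int) (item : Int) : Bool :=
  let s := PySem.List.sorted mylist (fun x => x) false
  osLoopA item s

-- ===== PORT B =====
def OrderedSequrntialSearch_alt (mylist : List Int) (item : Int) : Bool :=
  let s := PySem.List.sorted mylist (fun x => x) false
  let i := PySem.List.bisectLeft s item
  if h : i < s.length then s[i] == item else false

-- ===== PRECONDITION & SPEC =====
def Spec_OrderedSequrntialSearch (mylist : List Int) (item : Int) (out : Bool) : Prop := out = OrderedSequrntialSearch_alt mylist item
instance (mylist : List Int) (item : Int) (out : Bool) : Decidable (Spec_OrderedSequrntialSearch mylist item out) := by unfold Spec_OrderedSequrntialSearch; infer_instance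

-- ===== CLAIM (what is proved, stated in full; the proofs are below) =====
def Claim_equal_OrderedSequrntialSearch : Prop := ∀ (mylist : List Int) (item : Int), Dom_OrderedSequrntialSearch mylist item → Spec_OrderedSequrntialSearch mylist item (OrderedSequrntialSearch mylist item)

-- ===== LEMMAS AND PROOFS =====

-- A's scan of an ≤-sorted list decides membership
theorem osLoopA_eq_mem (item : Int) (l : List Int)
    (h : l.Pairwise (· ≤ ·)) : osLoopA item l = decide (item ∈ l) := by
  induction l with
  | nil => simp [osLoopA]
  | cons x xs ih =>
    rcases List.pairwise_cons.mp h with ⟨hx, hxs⟩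
    by_cases he : x = item
    · simp [osLoopA, he]
    · by_cases hgt : x > item
      · have : item ∉ xs := fun hm => absurd (hx item hm) (by omega)
        simp [osLoopA, he, hgt, this, Ne.symm he]
      · simp [osLoopA, he, hgt, ih hxs, Ne.symm he]

-- B's bisect probe of an ≤-sorted list decides membership
theorem bisect_probe_eq_mem (item : Int) (s : List Int)
    (h : s.Pairwise (· ≤ ·)) :
    (if hh : PySem.List.bisectLeft s item < s.length
       then s[PySem.List.bisectLeft s item] == item else false)
      = decide (item ∈ s) := by
  obtain ⟨hle, hlt, hge⟩ := PySem.List.bisectLeft_spec s item h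
  set i := PySem.List.bisectLeft s item with hi
  by_cases hmem : item ∈ s
  · obtain ⟨j, hj, hjv⟩ := List.getElem_of_mem hmem
    have hij : i ≤ j := by
      by_contra hc
      exact absurd hjv (by have := hlt j hj (by omega); omega)
    have hilen : i < s.length := by omega
    have h1 : item ≤ s[i] := hge i hilen (le_refl i)
    have h2 : s[i] ≤ s[j] := by
      rcases List.pairwise_iff_getElem.mp h with hp
      rcases lt_or_eq_of_le hij with hlt' | heq
      · exact hp i j hilen hj hlt'
      · simp [heq]
    simp [hilen, hmem]
    omega
  · simp [hmem]
    intro hilen hv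
    exact hmem (hv ▸ List.getElem_mem hilen)

-- ===== VERDICT (by name: the statement is the Claim_ definition above) =====
theorem OrderedSequrntialSearch_spec : Claim_equal_OrderedSequrntialSearch := by
  intro mylist item _
  unfold Spec_OrderedSequrntialSearch OrderedSequrntialSearch OrderedSequrntialSearch_alt
  have h := PySem.List.sorted_pairwise mylist (fun x => x)
  rw [osLoopA_eq_mem item _ h, bisect_probe_eq_mem item _ h]
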